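-- pv_equiv track=rewrite | github.com/crazyAxe/leetcode | newcoder/coinBet.py | win2
-- ===== SOURCE A (Python) =====
-- def win2(arrs):
--     s = [[0 for start in range(len(arrs)) if end >= start] for end in range(len(arrs))]
--     f = [[0 for start in range(len(arrs)) if end >= start] for end in range(len(arrs))]
--     for end in range(len(arrs)):
--         f[end][end] = arrs[end]
--         for start in range(end-1, -1, -1):  # start in (end-1, end-2, ..., 0)
--             f[end][start] = max(arrs[start] + s[end][start+1], arrs[end] + s[end-1][start])
--             s[end][start] = min(f[end][start+1], f[end-1][start])
--     return max(f[len(arrs)-1][0], s[len(arrs)-1][0])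
-- ===== SOURCE B (Python) =====
-- def win2(arrs):
--     # top-down memoized recursion over intervals: solve(i, j) = (score of the
--     # player to move, score of the other) on the coin interval arrs[i..j]
--     memo = {}
--
--     def solve(i, j):
--         if i == j:
--             return (arrs[i], 0)
--         if (i, j) not in memo:
--             fr, sr = solve(i + 1, j)
--             fl, sl = solve(i, j - 1)
--             memo[(i, j)] = (max(arrs[i] + sr, arrs[j] + sl), min(fr, fl))
--         return memo[(i, j)]
--
--     f, s = solve(0, len(arrs) - 1)
--     return max(f, s)
-- ===== Notes on version B (the rewrite author's own statement) =====
-- stated objective: alternative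
-- what changed: Replaces the bottom-up sweep that fills two end-indexed triangular tables with a top-down memoized recursion solve(i,j) over shrinking intervals returning (mover, opponent) score pairs.
import Mathlib
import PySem

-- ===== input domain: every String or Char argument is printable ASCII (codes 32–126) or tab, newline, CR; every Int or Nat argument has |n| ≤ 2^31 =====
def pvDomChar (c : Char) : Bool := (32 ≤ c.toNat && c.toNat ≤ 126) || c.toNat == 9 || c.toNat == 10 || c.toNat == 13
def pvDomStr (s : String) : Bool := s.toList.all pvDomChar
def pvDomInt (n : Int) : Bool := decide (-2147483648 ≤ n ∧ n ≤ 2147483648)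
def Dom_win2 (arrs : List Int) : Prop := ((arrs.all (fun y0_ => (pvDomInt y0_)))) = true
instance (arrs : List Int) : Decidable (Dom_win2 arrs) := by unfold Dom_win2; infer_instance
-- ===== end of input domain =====

-- B replaces A's bottom-up sweep over two triangular tables by a top-down recursion
-- solve(i, j) over intervals returning (mover, opponent) pairs (same arithmetic; the
-- Python memo dict only caches identical values, so the port is the plain recursion).

-- ===== PORT A =====
-- The mutable triangular lists f, s are modelled as total functions Nat → Nat → Int
-- initialised to 0 (the zero-filled rows); f[end][start] is f end start. Every index A
-- uses is non-negative and (on Pre_) in range, so List.getD is exact for arrs[i], and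
-- range(end-1, -1, -1) is exactly (List.range end).reverse.
def win2 (arrs : List Int) : Int :=
  let n := arrs.length
  let fs :=
    (List.range n).foldl
      (fun (p : (Nat → Nat → Int) × (Nat → Nat → Int)) e =>
        (List.range e).reverse.foldl
          (fun q st =>
            let fv := max (arrs.getD st 0 + q.2 e (st+1)) (arrs.getD e 0 + q.2 (e-1) st)
            let sv := min (q.1 e (st+1)) (q.1 (e-1) st)
            ((fun E S => if E = e ∧ S = st then fv else q.1 E S),
             (fun E S => if E = e ∧ S = st then sv else q.2 E S)))
          ((fun E S => if E = e ∧ S = e then arrs.getD e 0 else p.1 E S), p.2))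
      ((fun _ _ => 0), (fun _ _ => 0))
  max (fs.1 (n-1) 0) (fs.2 (n-1) 0)

-- ===== PORT B =====
-- solve(i, j) of Source B; its memo dict only caches values the recursion would recompute
-- identically, so the port is the plain recursion. The `j ≤ i` base case is Source B's
-- `i == j` base made total (on Pre_ the recursion only ever reaches i ≤ j, where
-- `j ≤ i` coincides with `i == j`); arrs[i] with in-range i is List.getD.
def pvSolve (arrs : List Int) (i j : Nat) : Int × Int :=
  if j ≤ i then (arrs.getD i 0, 0)
  else
    let r := pvSolve arrs (i+1) j
    let l := pvSolve arrs i (j-1)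
    (max (arrs.getD i 0 + r.2) (arrs.getD j 0 + l.2), min r.1 l.1)
  termination_by j - i
  decreasing_by all_goals omega

def win2_alt (arrs : List Int) : Int :=
  let fs := pvSolve arrs 0 (arrs.length - 1)
  max fs.1 fs.2

-- ===== PRECONDITION & SPEC =====
-- Pre_ excludes only the empty list, on which A raises IndexError.
def Pre_win2 (arrs : List Int) : Prop := arrs ≠ []
instance (arrs : List Int) : Decidable (Pre_win2 arrs) := by unfold Pre_win2; infer_instance
def pvWitness_win2 : List Int := [3, 1, 2]
def Spec_win2 (arrs : List Int) (out : Int) : Prop := out = win2_alt arrs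
instance (arrs : List Int) (out : Int) : Decidable (Spec_win2 arrs out) := by unfold Spec_win2; infer_instance

-- ===== CLAIM (what is proved, stated in full; the proofs are below) =====
def Claim_equal_win2 : Prop := ∀ (arrs : List Int), Dom_win2 arrs → Pre_win2 arrs → Spec_win2 arrs (win2 arrs)

-- ===== LEMMAS AND PROOFS =====

-- game value of the interval [i, i+g]: (score of the player to move, score of the other)
def pvV (arrs : List Int) : Nat → Nat → Int × Int
  | i, 0 => (arrs.getD i 0, 0)
  | i, g+1 =>
      (max (arrs.getD i 0 + (pvV arrs (i+1) g).2) (arrs.getD (i+g+1) 0 + (pvV arrs i g).2),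
       min (pvV arrs (i+1) g).1 (pvV arrs i g).1)

-- table views: pvF E S / pvS E S are the intended values of f[E][S] / s[E][S] (S ≤ E)
def pvF (arrs : List Int) (E S : Nat) : Int := (pvV arrs S (E - S)).1
def pvS (arrs : List Int) (E S : Nat) : Int := (pvV arrs S (E - S)).2

theorem pvS_diag (arrs : List Int) (E : Nat) : pvS arrs E E = 0 := by
  simp [pvS, pvV]

theorem pvF_diag (arrs : List Int) (E : Nat) : pvF arrs E E = arrs.getD E 0 := by
  simp [pvF, pvV]

theorem pvF_rec (arrs : List Int) (E S : Nat) (h : S < E) :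
    pvF arrs E S = max (arrs.getD S 0 + pvS arrs E (S+1)) (arrs.getD E 0 + pvS arrs (E-1) S) := by
  obtain ⟨g, hg⟩ : ∃ g, E - S = g + 1 := ⟨E - S - 1, by omega⟩
  unfold pvF pvS
  rw [hg, show E - (S+1) = g by omega, show E - 1 - S = g by omega,
      show E = S + g + 1 by omega]
  simp [pvV]

theorem pvS_rec (arrs : List Int) (E S : Nat) (h : S < E) :
    pvS arrs E S = min (pvF arrs E (S+1)) (pvF arrs (E-1) S) := by
  obtain ⟨g, hg⟩ : ∃ g, E - S = g + 1 := ⟨E - S - 1, by omega⟩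
  unfold pvF pvS
  rw [hg, show E - (S+1) = g by omega, show E - 1 - S = g by omega]
  simp [pvV]

-- ===== A side =====

-- the inner loop of A fills row e of both tables from start = k-1 down to 0
theorem A_inner (arrs : List Int) (e : Nat) :
    ∀ (k : Nat) (f s : Nat → Nat → Int), k ≤ e →
    (∀ E S, f E S = if (S ≤ E ∧ E < e) ∨ (E = e ∧ k ≤ S ∧ S ≤ e) then pvF arrs E S else 0) →
    (∀ E S, s E S = if (S ≤ E ∧ E < e) ∨ (E = e ∧ k ≤ S ∧ S ≤ e) then pvS arrs E S else 0) →
    (∀ E S, ((List.range k).reverse.foldl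
          (fun (q : (Nat → Nat → Int) × (Nat → Nat → Int)) st =>
            let fv := max (arrs.getD st 0 + q.2 e (st+1)) (arrs.getD e 0 + q.2 (e-1) st)
            let sv := min (q.1 e (st+1)) (q.1 (e-1) st)
            ((fun E S => if E = e ∧ S = st then fv else q.1 E S),
             (fun E S => if E = e ∧ S = st then sv else q.2 E S)))
          (f, s)).1 E S = if S ≤ E ∧ E ≤ e then pvF arrs E S else 0) ∧
    (∀ E S, ((List.range k).reverse.foldl
          (fun (q : (Nat → Nat → Int) × (Nat → Nat → Int)) st =>
            let fv := max (arrs.getD st 0 + q.2 e (st+1)) (arrs.getD e 0 + q.2 (e-1) st)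
            let sv := min (q.1 e (st+1)) (q.1 (e-1) st)
            ((fun E S => if E = e ∧ S = st then fv else q.1 E S),
             (fun E S => if E = e ∧ S = st then sv else q.2 E S)))
          (f, s)).2 E S = if S ≤ E ∧ E ≤ e then pvS arrs E S else 0) := by
  intro k
  induction k with
  | zero =>
    intro f s _ hf hs
    simp only [List.range_zero, List.reverse_nil, List.foldl_nil]
    constructor <;> intro E S
    · show f E S = _
      rw [hf E S]; exact if_congr (by omega) rfl rfl
    · show s E S = _
      rw [hs E S]; exact if_congr (by omega) rfl rfl
  | succ k ih =>
    intro f s hk hf hs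
    rw [List.range_succ, List.reverse_append, List.reverse_singleton, List.singleton_append,
        List.foldl_cons]
    have hse : s e (k+1) = pvS arrs e (k+1) := by rw [hs]; exact if_pos (by omega)
    have hsk : s (e-1) k = pvS arrs (e-1) k := by rw [hs]; exact if_pos (by omega)
    have hfe : f e (k+1) = pvF arrs e (k+1) := by rw [hf]; exact if_pos (by omega)
    have hfk : f (e-1) k = pvF arrs (e-1) k := by rw [hf]; exact if_pos (by omega)
    refine ih _ _ (by omega) ?_ ?_
    · intro E S
      show (if E = e ∧ S = k
            then max (arrs.getD k 0 + s e (k+1)) (arrs.getD e 0 + s (e-1) k)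
            else f E S) = _
      by_cases h : E = e ∧ S = k
      · rw [if_pos h, hse, hsk, ← pvF_rec arrs e k (by omega)]
        obtain ⟨rfl, rfl⟩ := h
        exact (if_pos (by omega)).symm
      · rw [if_neg h, hf E S]
        exact if_congr (by omega) rfl rfl
    · intro E S
      show (if E = e ∧ S = k
            then min (f e (k+1)) (f (e-1) k)
            else s E S) = _
      by_cases h : E = e ∧ S = k
      · rw [if_pos h, hfe, hfk, ← pvS_rec arrs e k (by omega)]
        obtain ⟨rfl, rfl⟩ := h
        exact (if_pos (by omega)).symm
      · rw [if_neg h, hs E S]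
        exact if_congr (by omega) rfl rfl

-- one outer iteration: from tables correct below row m to tables correct up to row m
theorem A_step (arrs : List Int) (m : Nat) (f s : Nat → Nat → Int)
    (hf : ∀ E S, f E S = if S ≤ E ∧ E < m then pvF arrs E S else 0)
    (hs : ∀ E S, s E S = if S ≤ E ∧ E < m then pvS arrs E S else 0) :
    (∀ E S, ((List.range m).reverse.foldl
          (fun (q : (Nat → Nat → Int) × (Nat → Nat → Int)) st =>
            let fv := max (arrs.getD st 0 + q.2 m (st+1)) (arrs.getD m 0 + q.2 (m-1) st)
            let sv := min (q.1 m (st+1)) (q.1 (m-1) st)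
            ((fun E S => if E = m ∧ S = st then fv else q.1 E S),
             (fun E S => if E = m ∧ S = st then sv else q.2 E S)))
          ((fun E S => if E = m ∧ S = m then arrs.getD m 0 else f E S), s)).1 E S
        = if S ≤ E ∧ E ≤ m then pvF arrs E S else 0) ∧
    (∀ E S, ((List.range m).reverse.foldl
          (fun (q : (Nat → Nat → Int) × (Nat → Nat → Int)) st =>
            let fv := max (arrs.getD st 0 + q.2 m (st+1)) (arrs.getD m 0 + q.2 (m-1) st)
            let sv := min (q.1 m (st+1)) (q.1 (m-1) st)
            ((fun E S => if E = m ∧ S = st then fv else q.1 E S),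
             (fun E S => if E = m ∧ S = st then sv else q.2 E S)))
          ((fun E S => if E = m ∧ S = m then arrs.getD m 0 else f E S), s)).2 E S
        = if S ≤ E ∧ E ≤ m then pvS arrs E S else 0) := by
  apply A_inner arrs m m _ _ (le_refl m)
  · intro E S
    show (if E = m ∧ S = m then arrs.getD m 0 else f E S) = _
    by_cases h : E = m ∧ S = m
    · rw [if_pos h]
      obtain ⟨rfl, rfl⟩ := h
      rw [if_pos (by omega), pvF_diag]
    · rw [if_neg h, hf E S]
      exact if_congr (by omega) rfl rfl
  · intro E S
    show s E S = _
    by_cases h : E = m ∧ S = m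
    · obtain ⟨rfl, rfl⟩ := h
      rw [hs, if_neg (by omega), if_pos (by omega), pvS_diag]
    · rw [hs E S]
      exact if_congr (by omega) rfl rfl

-- the outer loop of A: after processing ends 0..m-1 both tables hold pvF/pvS below row m
theorem A_outer (arrs : List Int) (m : Nat) :
    (∀ E S, ((List.range m).foldl
      (fun (p : (Nat → Nat → Int) × (Nat → Nat → Int)) e =>
        (List.range e).reverse.foldl
          (fun (q : (Nat → Nat → Int) × (Nat → Nat → Int)) st =>
            let fv := max (arrs.getD st 0 + q.2 e (st+1)) (arrs.getD e 0 + q.2 (e-1) st)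
            let sv := min (q.1 e (st+1)) (q.1 (e-1) st)
            ((fun E S => if E = e ∧ S = st then fv else q.1 E S),
             (fun E S => if E = e ∧ S = st then sv else q.2 E S)))
          ((fun E S => if E = e ∧ S = e then arrs.getD e 0 else p.1 E S), p.2))
      ((fun _ _ => 0), (fun _ _ => 0))).1 E S = if S ≤ E ∧ E < m then pvF arrs E S else 0) ∧
    (∀ E S, ((List.range m).foldl
      (fun (p : (Nat → Nat → Int) × (Nat → Nat → Int)) e =>
        (List.range e).reverse.foldl
          (fun (q : (Nat → Nat → Int) × (Nat → Nat → Int)) st =>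
            let fv := max (arrs.getD st 0 + q.2 e (st+1)) (arrs.getD e 0 + q.2 (e-1) st)
            let sv := min (q.1 e (st+1)) (q.1 (e-1) st)
            ((fun E S => if E = e ∧ S = st then fv else q.1 E S),
             (fun E S => if E = e ∧ S = st then sv else q.2 E S)))
          ((fun E S => if E = e ∧ S = e then arrs.getD e 0 else p.1 E S), p.2))
      ((fun _ _ => 0), (fun _ _ => 0))).2 E S = if S ≤ E ∧ E < m then pvS arrs E S else 0) := by
  induction m with
  | zero =>
    constructor <;> intro E S <;> simp only [List.range_zero, List.foldl_nil] <;>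
      exact (if_neg (by omega)).symm
  | succ m ih =>
    rw [List.range_succ, List.foldl_append, List.foldl_cons, List.foldl_nil]
    simp only [Nat.lt_succ_iff]
    exact A_step arrs m _ _ ih.1 ih.2

theorem win2_eq (arrs : List Int) (h : arrs ≠ []) :
    win2 arrs = max (pvV arrs 0 (arrs.length - 1)).1 (pvV arrs 0 (arrs.length - 1)).2 := by
  have hn : 1 ≤ arrs.length := List.length_pos_iff.mpr h
  obtain ⟨h1, h2⟩ := A_outer arrs arrs.length
  rw [show win2 arrs
      = max (((List.range arrs.length).foldl
          (fun (p : (Nat → Nat → Int) × (Nat → Nat → Int)) e =>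
            (List.range e).reverse.foldl
              (fun (q : (Nat → Nat → Int) × (Nat → Nat → Int)) st =>
                let fv := max (arrs.getD st 0 + q.2 e (st+1)) (arrs.getD e 0 + q.2 (e-1) st)
                let sv := min (q.1 e (st+1)) (q.1 (e-1) st)
                ((fun E S => if E = e ∧ S = st then fv else q.1 E S),
                 (fun E S => if E = e ∧ S = st then sv else q.2 E S)))
              ((fun E S => if E = e ∧ S = e then arrs.getD e 0 else p.1 E S), p.2))
          ((fun _ _ => 0), (fun _ _ => 0))).1 (arrs.length - 1) 0)
            (((List.range arrs.length).foldl
          (fun (p : (Nat → Nat → Int) × (Nat → Nat → Int)) e =>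
            (List.range e).reverse.foldl
              (fun (q : (Nat → Nat → Int) × (Nat → Nat → Int)) st =>
                let fv := max (arrs.getD st 0 + q.2 e (st+1)) (arrs.getD e 0 + q.2 (e-1) st)
                let sv := min (q.1 e (st+1)) (q.1 (e-1) st)
                ((fun E S => if E = e ∧ S = st then fv else q.1 E S),
                 (fun E S => if E = e ∧ S = st then sv else q.2 E S)))
              ((fun E S => if E = e ∧ S = e then arrs.getD e 0 else p.1 E S), p.2))
          ((fun _ _ => 0), (fun _ _ => 0))).2 (arrs.length - 1) 0) from rfl,
      h1, h2, if_pos (by omega), if_pos (by omega)]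
  unfold pvF pvS
  rw [show arrs.length - 1 - 0 = arrs.length - 1 by omega]

-- ===== B side =====

-- the recursion solve(i, j) computes the interval value pvV i (j - i)
theorem pvSolve_eq_pvV (arrs : List Int) :
    ∀ (g i : Nat), pvSolve arrs i (i + g) = pvV arrs i g := by
  intro g
  induction g with
  | zero =>
    intro i
    rw [pvSolve]
    simp [pvV]
  | succ g ih =>
    intro i
    rw [pvSolve, if_neg (by omega)]
    have hr : pvSolve arrs (i+1) (i + (g+1)) = pvV arrs (i+1) g := by
      rw [show i + (g+1) = (i+1) + g by omega]; exact ih (i+1)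
    have hl : pvSolve arrs i (i + (g+1) - 1) = pvV arrs i g := by
      rw [show i + (g+1) - 1 = i + g by omega]; exact ih i
    simp only [hr, hl]
    rfl

theorem win2_alt_eq (arrs : List Int) :
    win2_alt arrs = max (pvV arrs 0 (arrs.length - 1)).1 (pvV arrs 0 (arrs.length - 1)).2 := by
  unfold win2_alt
  rw [show arrs.length - 1 = 0 + (arrs.length - 1) by omega, pvSolve_eq_pvV]
  rw [show (0:Nat) + (arrs.length - 1) = arrs.length - 1 by omega]

-- ===== VERDICT (by name: the statement is the Claim_ definition above) =====
theorem win2_spec : Claim_equal_win2 := by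
  intro arrs _ hpre
  unfold Spec_win2
  rw [win2_eq arrs hpre, win2_alt_eq arrs]
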